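-- pv_equiv track=rewrite | github.com/Tetragramm/flying-circus-catalog-maker | Create.py | ParseVitalParts
-- ===== SOURCE A (Python) =====
-- def ParseVitalParts(vp):
--     part_list = vp.split(',')
--     part_list = [x.strip() for x in part_list]
--     singular = [x for x in part_list if not '#' in x]
--     Engines = [x for x in part_list if 'Engine' in x]
--     Radiators = [x for x in part_list if 'Radiator' in x]
--     OilCooler = [x for x in part_list if 'Oil Cooler' in x]
--     OilPan = [x for x in part_list if 'Oil Pan' in x]
--     OilTank = [x for x in part_list if 'Oil Tank' in x]
--     Guns = [x for x in part_list if 'Weapon' in x]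
--     Pilot = [x for x in part_list if ': Pilot' in x]
--     CoPilot = [x for x in part_list if 'Co-Pilot' in x]
--     Gunner = [x for x in part_list if 'Gunner' in x]
--     Bombadier = [x for x in part_list if 'Bombadier' in x]
--     Aircrew = [x for x in part_list if 'Aircrew' in x]
--
--     output = []
--
--     def append(arr, str):
--         if len(arr) == 1:
--             output.append(str)
--         elif len(arr) > 1:
--             output.append('x{} {}s'.format(len(arr), str))
--
--     append(Engines, 'Engine')
--     append(OilCooler, 'Oil Cooler')
--     append(OilPan, 'Oil Pan')
--     append(OilTank, 'Oil Tank')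
--     append(Radiators, 'Radiator')
--     append(Guns, 'Gun')
--     output = output + singular
--     str = ', '.join(output) + '\\\\'
--     output = []
--     append(Pilot, 'Pilot')
--     append(CoPilot, 'Co-Pilot')
--     append(Bombadier, 'Bombadier')
--     append(Gunner, 'Gunner')
--     append(Aircrew, 'Aircrew')
--     return str + ', '.join(output)
-- ===== SOURCE B (Python) =====
-- CATS1 = [('Engine', 'Engine'), ('Oil Cooler', 'Oil Cooler'), ('Oil Pan', 'Oil Pan'),
--          ('Oil Tank', 'Oil Tank'), ('Radiator', 'Radiator'), ('Weapon', 'Gun')]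
-- CATS2 = [(': Pilot', 'Pilot'), ('Co-Pilot', 'Co-Pilot'), ('Bombadier', 'Bombadier'),
--          ('Gunner', 'Gunner'), ('Aircrew', 'Aircrew')]
--
--
-- def _fmt(n, name):
--     if n == 1:
--         return [name]
--     if n > 1:
--         return ['x{} {}s'.format(n, name)]
--     return []
--
--
-- def ParseVitalParts(vp):
--     counts1 = [0] * len(CATS1)
--     counts2 = [0] * len(CATS2)
--     singular = []
--     for raw in vp.split(','):
--         x = raw.strip()
--         counts1 = [c + 1 if sub in x else c for (sub, _), c in zip(CATS1, counts1)]
--         counts2 = [c + 1 if sub in x else c for (sub, _), c in zip(CATS2, counts2)]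
--         if '#' not in x:
--             singular.append(x)
--     out1 = [item for (_, name), c in zip(CATS1, counts1) for item in _fmt(c, name)]
--     out1 += singular
--     out2 = [item for (_, name), c in zip(CATS2, counts2) for item in _fmt(c, name)]
--     return ', '.join(out1) + '\\\\' + ', '.join(out2)
-- ===== Notes on version B (the rewrite author's own statement) =====
-- stated objective: alternative
-- what changed: A makes twelve independent filter passes over the part list and formats from the filtered sublists; B makes a single pass that strips each part once and maintains per-category counters plus the singular list, then formats from the counters.
import Mathlib
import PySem

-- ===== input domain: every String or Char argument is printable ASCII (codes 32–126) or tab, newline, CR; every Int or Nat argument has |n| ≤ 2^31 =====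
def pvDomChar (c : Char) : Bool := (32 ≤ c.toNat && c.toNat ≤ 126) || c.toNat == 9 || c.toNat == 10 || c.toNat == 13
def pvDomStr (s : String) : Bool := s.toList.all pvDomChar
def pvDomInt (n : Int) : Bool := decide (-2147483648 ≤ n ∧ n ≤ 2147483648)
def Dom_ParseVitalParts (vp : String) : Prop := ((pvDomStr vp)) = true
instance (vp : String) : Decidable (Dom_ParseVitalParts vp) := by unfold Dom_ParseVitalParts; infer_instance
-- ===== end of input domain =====

-- B replaces A's twelve independent filter passes over the part list by a single pass
-- that maintains per-category counters and the singular list (objective: alternative decomposition).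

-- ===== PORT A =====
-- A's inner `append(arr, str)` helper (appends to the running output list)
def pvAppendA (output : List String) (arr : List String) (s : String) : List String :=
  if arr.length = 1 then output ++ [s]
  else if arr.length > 1 then
    output ++ ["x" ++ PySem.Int.toStr (arr.length : Int) ++ " " ++ s ++ "s"]
  else output

def ParseVitalParts (vp : String) : String :=
  let part_list : List String := ((PySem.Str.split? vp ",").getD []).map PySem.Str.strip  -- sep "," ≠ "": split? is always some
  let singular := part_list.filter (fun x => !PySem.Str.isIn "#" x)
  let Engines := part_list.filter (fun x => PySem.Str.isIn "Engine" x)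
  let Radiators := part_list.filter (fun x => PySem.Str.isIn "Radiator" x)
  let OilCooler := part_list.filter (fun x => PySem.Str.isIn "Oil Cooler" x)
  let OilPan := part_list.filter (fun x => PySem.Str.isIn "Oil Pan" x)
  let OilTank := part_list.filter (fun x => PySem.Str.isIn "Oil Tank" x)
  let Guns := part_list.filter (fun x => PySem.Str.isIn "Weapon" x)
  let Pilot := part_list.filter (fun x => PySem.Str.isIn ": Pilot" x)
  let CoPilot := part_list.filter (fun x => PySem.Str.isIn "Co-Pilot" x)
  let Gunner := part_list.filter (fun x => PySem.Str.isIn "Gunner" x)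
  let Bombadier := part_list.filter (fun x => PySem.Str.isIn "Bombadier" x)
  let Aircrew := part_list.filter (fun x => PySem.Str.isIn "Aircrew" x)
  let output : List String := []
  let output := pvAppendA output Engines "Engine"
  let output := pvAppendA output OilCooler "Oil Cooler"
  let output := pvAppendA output OilPan "Oil Pan"
  let output := pvAppendA output OilTank "Oil Tank"
  let output := pvAppendA output Radiators "Radiator"
  let output := pvAppendA output Guns "Gun"
  let output := output ++ singular
  let str := PySem.Str.join ", " output ++ "\\\\"
  let output2 : List String := []
  let output2 := pvAppendA output2 Pilot "Pilot"
  let output2 := pvAppendA output2 CoPilot "Co-Pilot"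
  let output2 := pvAppendA output2 Bombadier "Bombadier"
  let output2 := pvAppendA output2 Gunner "Gunner"
  let output2 := pvAppendA output2 Aircrew "Aircrew"
  str ++ PySem.Str.join ", " output2

-- ===== PORT B =====
def pvCats1 : List (String × String) :=
  [("Engine", "Engine"), ("Oil Cooler", "Oil Cooler"), ("Oil Pan", "Oil Pan"),
   ("Oil Tank", "Oil Tank"), ("Radiator", "Radiator"), ("Weapon", "Gun")]

def pvCats2 : List (String × String) :=
  [(": Pilot", "Pilot"), ("Co-Pilot", "Co-Pilot"), ("Bombadier", "Bombadier"),
   ("Gunner", "Gunner"), ("Aircrew", "Aircrew")]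

-- Source B's `_fmt(n, name)`
def pvFmt (n : Nat) (name : String) : List String :=
  if n = 1 then [name]
  else if n > 1 then ["x" ++ PySem.Int.toStr (n : Int) ++ " " ++ name ++ "s"]
  else []

-- Source B's loop body: strip, bump every matching counter (zip comprehensions), collect singular
def pvStep (st : List Nat × List Nat × List String) (raw : String) :
    List Nat × List Nat × List String :=
  let x := PySem.Str.strip raw
  (List.zipWith (fun (p : String × String) (c : Nat) => if PySem.Str.isIn p.1 x then c + 1 else c)
     pvCats1 st.1,
   List.zipWith (fun (p : String × String) (c : Nat) => if PySem.Str.isIn p.1 x then c + 1 else c)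
     pvCats2 st.2.1,
   if PySem.Str.isIn "#" x then st.2.2 else st.2.2 ++ [x])

def ParseVitalParts_alt (vp : String) : String :=
  let st : List Nat × List Nat × List String :=
    ((PySem.Str.split? vp ",").getD []).foldl pvStep
      (List.replicate pvCats1.length 0, List.replicate pvCats2.length 0, [])  -- sep "," ≠ "": split? is always some
  let out1 :=
    (List.zipWith (fun (p : String × String) (c : Nat) => pvFmt c p.2) pvCats1 st.1).flatten
      ++ st.2.2
  let out2 :=
    (List.zipWith (fun (p : String × String) (c : Nat) => pvFmt c p.2) pvCats2 st.2.1).flatten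
  PySem.Str.join ", " out1 ++ "\\\\" ++ PySem.Str.join ", " out2

-- ===== PRECONDITION & SPEC =====
def Spec_ParseVitalParts (vp : String) (out : String) : Prop := out = ParseVitalParts_alt vp
instance (vp : String) (out : String) : Decidable (Spec_ParseVitalParts vp out) := by unfold Spec_ParseVitalParts; infer_instance

-- ===== CLAIM (what is proved, stated in full; the proofs are below) =====
def Claim_equal_ParseVitalParts : Prop := ∀ (vp : String), Dom_ParseVitalParts vp → Spec_ParseVitalParts vp (ParseVitalParts vp)

-- ===== LEMMAS AND PROOFS =====

lemma pvZipWith_zipWith {α β : Type} (f g : α → β → β) (l : List α) (c : List β) :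
    List.zipWith f l (List.zipWith g l c) = List.zipWith (fun a b => f a (g a b)) l c := by
  induction l generalizing c with
  | nil => simp
  | cons a l ih => cases c <;> simp [ih]

lemma pvZipWith_replicate {α β γ : Type} (f : α → β → γ) (l : List α) (b : β) :
    List.zipWith f l (List.replicate l.length b) = l.map (fun a => f a b) := by
  induction l with
  | nil => simp
  | cons a l ih => simp [List.replicate_succ, ih]

lemma pvZipWith_map_self {α β γ : Type} (f : α → β → γ) (g : α → β) (l : List α) :
    List.zipWith f l (l.map g) = l.map (fun a => f a (g a)) := by
  induction l <;> simp_all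

-- the one-pass loop computes, per category, the count of matching stripped parts,
-- and appends exactly the '#'-free stripped parts
lemma pvZipWith_id {α β : Type} (l : List α) (c : List β) (h : c.length = l.length) :
    List.zipWith (fun (_ : α) (b : β) => b) l c = c := by
  induction l generalizing c with
  | nil => cases c <;> simp_all
  | cons a l ih => cases c <;> simp_all

lemma pvFoldStep (l : List String) (c1 c2 : List Nat) (s : List String)
    (h1 : c1.length = pvCats1.length) (h2 : c2.length = pvCats2.length) :
    l.foldl pvStep (c1, c2, s) =
      (List.zipWith
         (fun (p : String × String) (ci : Nat) =>
           ci + (l.map PySem.Str.strip).countP (fun x => PySem.Str.isIn p.1 x)) pvCats1 c1,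
       List.zipWith
         (fun (p : String × String) (ci : Nat) =>
           ci + (l.map PySem.Str.strip).countP (fun x => PySem.Str.isIn p.1 x)) pvCats2 c2,
       s ++ (l.map PySem.Str.strip).filter (fun x => !PySem.Str.isIn "#" x)) := by
  induction l generalizing c1 c2 s with
  | nil =>
    simp only [List.foldl_nil, List.map_nil, List.countP_nil, Nat.add_zero, List.filter_nil,
      List.append_nil]
    rw [show (fun (p : String × String) (ci : Nat) => ci) = (fun (_ : String × String) (b : Nat) => b) from rfl,
      pvZipWith_id _ _ h1, pvZipWith_id _ _ h2]
  | cons r l ih =>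
    rw [List.foldl_cons]
    simp only [pvStep]
    rw [ih _ _ _ (by simp [h1]) (by simp [h2]), pvZipWith_zipWith, pvZipWith_zipWith,
      Prod.mk.injEq, Prod.mk.injEq]
    have hfg : ∀ (cats : List (String × String)) (c : List Nat),
        List.zipWith (fun (p : String × String) (ci : Nat) =>
          (if PySem.Str.isIn p.1 (PySem.Str.strip r) = true then ci + 1 else ci) +
            List.countP (fun x => PySem.Str.isIn p.1 x) (List.map PySem.Str.strip l)) cats c =
        List.zipWith (fun (p : String × String) (ci : Nat) =>
          ci + List.countP (fun x => PySem.Str.isIn p.1 x)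
            (List.map PySem.Str.strip (r :: l))) cats c := by
      intro cats c
      have : (fun (p : String × String) (ci : Nat) =>
          (if PySem.Str.isIn p.1 (PySem.Str.strip r) = true then ci + 1 else ci) +
            List.countP (fun x => PySem.Str.isIn p.1 x) (List.map PySem.Str.strip l)) =
          (fun (p : String × String) (ci : Nat) =>
            ci + List.countP (fun x => PySem.Str.isIn p.1 x)
              (List.map PySem.Str.strip (r :: l))) := by
        funext p ci
        simp only [List.map_cons, List.countP_cons]
        split_ifs <;> omega
      rw [this]
    refine ⟨hfg pvCats1 c1, hfg pvCats2 c2, ?_⟩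
    simp only [List.map_cons, List.filter_cons]
    split_ifs <;> simp_all

lemma pvAppendA_eq (output arr : List String) (s : String) :
    pvAppendA output arr s = output ++ pvFmt arr.length s := by
  unfold pvAppendA pvFmt
  split_ifs <;> simp

-- ===== VERDICT (by name: the statement is the Claim_ definition above) =====
theorem ParseVitalParts_spec : Claim_equal_ParseVitalParts := by
  intro vp _
  show ParseVitalParts vp = ParseVitalParts_alt vp
  simp only [ParseVitalParts, ParseVitalParts_alt]
  rw [pvFoldStep _ _ _ _ (by simp) (by simp), pvZipWith_replicate, pvZipWith_replicate, pvZipWith_map_self,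
    pvZipWith_map_self]
  simp only [pvCats1, pvCats2, pvAppendA_eq, List.countP_eq_length_filter,
    List.nil_append, List.map_cons, List.map_nil, List.flatten, Nat.zero_add, List.append_eq, List.append_nil, List.append_assoc]
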